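-- pv_equiv track=rewrite | github.com/Chacon-tu-drema/utesting_artlogic | mars_rover/mars_rover/mars_rover.py | execute
-- ===== SOURCE A (Python) =====
-- def execute(command: str) -> str:
--     x = 0
--     y = 0
--     c_points = ["N", "E", "S", "W"]
--     index = 0
--
--     for instruction in command:
--         if instruction == "R":
--             # if index < 3:
--             index += 1
--             if index > 3:
--                 index = 0
--         if instruction == "L":
--             index -= 1
--             if index < 0:
--                 index = 3
--         if instruction == "M":
--             if c_points[index] == "N":
--                 y += 1
--             if c_points[index] == "S":
--                 y -= 1
--             if c_points[index] == "W":
--                 x -= 1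
--             if c_points[index] == "E":
--                 x += 1
--         if x > 9:
--             x = 0
--         if y > 9:
--             y = 0
--
--     cardinal = c_points[index]
--
--     return "{}:{}:{}".format(x, y, cardinal)
-- ===== SOURCE B (Python) =====
-- def execute(command: str) -> str:
--     # Pass 1: compile the command into the final heading plus the list of
--     # headings under which each 'M' is executed (rotation is mod-4 arithmetic).
--     heading = 0
--     moves = []
--     for ch in command:
--         if ch == "R":
--             heading = (heading + 1) % 4
--         elif ch == "L":
--             heading = (heading - 1) % 4
--         elif ch == "M":
--             moves.append(heading)
--     # Pass 2: replay just the moves; the 0..9 wrap-around on the positive axes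
--     # becomes an equality test since coordinates never exceed 9.
--     x = y = 0
--     for h in moves:
--         if h == 0:
--             y = 0 if y == 9 else y + 1
--         elif h == 1:
--             x = 0 if x == 9 else x + 1
--         elif h == 2:
--             y -= 1
--         else:
--             x -= 1
--     return "{}:{}:{}".format(x, y, "NESW"[heading])
-- ===== Notes on version B (the rewrite author's own statement) =====
-- stated objective: alternative
-- what changed: Replaces A's single simulation loop (position + heading index + list lookups + per-iteration wrap tests) by two staged passes: pass 1 compiles the command into the final heading (mod-4 arithmetic) and a list of the headings under which each move fires; pass 2 replays only that move list, wrapping by an equality test since coordinates never exceed 9.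
import Mathlib
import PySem

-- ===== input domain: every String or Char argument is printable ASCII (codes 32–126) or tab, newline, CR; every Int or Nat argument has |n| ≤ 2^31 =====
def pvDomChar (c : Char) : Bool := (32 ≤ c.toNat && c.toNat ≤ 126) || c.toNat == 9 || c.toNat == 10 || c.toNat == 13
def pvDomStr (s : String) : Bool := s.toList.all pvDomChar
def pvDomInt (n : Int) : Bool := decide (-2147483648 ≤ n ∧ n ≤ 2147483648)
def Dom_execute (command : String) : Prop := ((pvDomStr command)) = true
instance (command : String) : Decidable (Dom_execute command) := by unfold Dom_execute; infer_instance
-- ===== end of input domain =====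

-- B restructures A's single simulation loop into two staged passes: compile the command
-- into a move list (mod-4 heading arithmetic), then replay the moves (alternative, not faster).

-- ===== PORT A =====
-- one loop iteration of A over state (x, y, index)
def execStepA (s : Int × Int × Int) (instruction : Char) : Int × Int × Int :=
  let x := s.1; let y := s.2.1; let index := s.2.2
  let cPoints : List String := ["N", "E", "S", "W"]
  let index := if instruction = 'R' then (if index + 1 > 3 then 0 else index + 1) else index
  let index := if instruction = 'L' then (if index - 1 < 0 then 3 else index - 1) else index
  let y := if instruction = 'M' ∧ (PySem.List.pyGet? cPoints index).getD "" = "N" then y + 1 else y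
  let y := if instruction = 'M' ∧ (PySem.List.pyGet? cPoints index).getD "" = "S" then y - 1 else y
  let x := if instruction = 'M' ∧ (PySem.List.pyGet? cPoints index).getD "" = "W" then x - 1 else x
  let x := if instruction = 'M' ∧ (PySem.List.pyGet? cPoints index).getD "" = "E" then x + 1 else x
  let x := if x > 9 then 0 else x
  let y := if y > 9 then 0 else y
  (x, y, index)

def execute (command : String) : String :=
  let s := command.toList.foldl execStepA (0, 0, 0)
  -- index stays in [0,3], so the lookup never raises; .getD "" is unreachable
  PySem.Int.toStr s.1 ++ ":" ++ PySem.Int.toStr s.2.1 ++ ":" ++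
    ((PySem.List.pyGet? ["N", "E", "S", "W"] s.2.2).getD "")

-- ===== PORT B =====
-- pass 1: fold over the command, state = (heading, list of headings of the 'M's)
def pass1Step (s : Int × List Int) (ch : Char) : Int × List Int :=
  if ch = 'R' then (PySem.Int.mod (s.1 + 1) 4, s.2)
  else if ch = 'L' then (PySem.Int.mod (s.1 - 1) 4, s.2)
  else if ch = 'M' then (s.1, s.2 ++ [s.1])
  else s

-- pass 2: replay one move under heading h
def pass2Step (p : Int × Int) (h : Int) : Int × Int :=
  if h = 0 then (p.1, if p.2 = 9 then 0 else p.2 + 1)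
  else if h = 1 then ((if p.1 = 9 then 0 else p.1 + 1), p.2)
  else if h = 2 then (p.1, p.2 - 1)
  else (p.1 - 1, p.2)

def execute_alt (command : String) : String :=
  let p := command.toList.foldl pass1Step (0, [])
  let q := p.2.foldl pass2Step (0, 0)
  -- the heading stays in [0,3], so the "NESW" index never raises
  PySem.Int.toStr q.1 ++ ":" ++ PySem.Int.toStr q.2 ++ ":" ++
    ((PySem.Str.pyGet? "NESW" p.1).getD ' ').toString

-- ===== PRECONDITION & SPEC =====
def Spec_execute (command : String) (out : String) : Prop := out = execute_alt command
instance (command : String) (out : String) : Decidable (Spec_execute command out) := by unfold Spec_execute; infer_instance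

-- ===== CLAIM (what is proved, stated in full; the proofs are below) =====
def Claim_equal_execute : Prop := ∀ (command : String), Dom_execute command → Spec_execute command (execute command)

-- ===== LEMMAS AND PROOFS =====

def IdxOK (i : Int) : Prop := i = 0 ∨ i = 1 ∨ i = 2 ∨ i = 3

-- pass 1 only ever appends to the accumulated move list
theorem pass1_acc (l : List Char) (i : Int) (ms : List Int) :
    l.foldl pass1Step (i, ms) =
      ((l.foldl pass1Step (i, ([] : List Int))).1,
        ms ++ (l.foldl pass1Step (i, ([] : List Int))).2) := by
  induction l generalizing i ms with
  | nil => simp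
  | cons c t ih =>
    simp only [List.foldl_cons]
    by_cases hR : c = 'R'
    · simp only [pass1Step, hR, if_pos rfl]
      exact ih _ ms
    · by_cases hL : c = 'L'
      · simp only [pass1Step, hL, Char.reduceEq, reduceIte]
        exact ih _ ms
      · by_cases hM : c = 'M'
        · simp only [pass1Step, hM, Char.reduceEq, reduceIte]
          rw [ih i (ms ++ [i]), ih i ([] ++ [i])]
          simp
        · simp only [pass1Step, hR, hL, hM, ite_false]
          exact ih i ms

-- main simulation invariant: A's fold equals B's two staged folds
theorem sim (l : List Char) (i x y : Int) (hi : IdxOK i) (hx : x ≤ 9) (hy : y ≤ 9) :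
    (let sA := l.foldl execStepA (x, y, i)
     let p := l.foldl pass1Step (i, ([] : List Int))
     p.1 = sA.2.2 ∧ p.2.foldl pass2Step (x, y) = (sA.1, sA.2.1) ∧
       IdxOK sA.2.2 ∧ sA.1 ≤ 9 ∧ sA.2.1 ≤ 9) := by
  induction l generalizing i x y with
  | nil => exact ⟨rfl, rfl, hi, hx, hy⟩
  | cons c t ih =>
    simp only [List.foldl_cons]
    by_cases hR : c = 'R'
    · have h1 : pass1Step (i, ([] : List Int)) c = ((execStepA (x, y, i) c).2.2, []) := by
        rcases hi with h | h | h | h <;> subst h <;>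
          simp [pass1Step, execStepA, hR, hx, hy] <;> decide
      have h2 : execStepA (x, y, i) c = (x, y, (execStepA (x, y, i) c).2.2) := by
        rcases hi with h | h | h | h <;> subst h <;>
          simp [execStepA, hR] <;>
          first
            | (constructor <;> omega)
            | omega
            | (split_ifs <;> simp_all)
      have hi' : IdxOK (execStepA (x, y, i) c).2.2 := by
        rcases hi with h | h | h | h <;> subst h <;> simp [execStepA, hR, IdxOK] <;>
          split_ifs <;> simp_all
      rw [h1]
      have := ih (execStepA (x, y, i) c).2.2 x y hi' hx hy
      rw [h2]
      exact this
    · by_cases hL : c = 'L'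
      · have h1 : pass1Step (i, ([] : List Int)) c = ((execStepA (x, y, i) c).2.2, []) := by
          rcases hi with h | h | h | h <;> subst h <;>
            simp [pass1Step, execStepA, hR, hL, hx, hy] <;> decide
        have h2 : execStepA (x, y, i) c = (x, y, (execStepA (x, y, i) c).2.2) := by
          rcases hi with h | h | h | h <;> subst h <;>
            simp [execStepA, hL] <;>
            first
              | (constructor <;> omega)
              | omega
              | (split_ifs <;> simp_all)
        have hi' : IdxOK (execStepA (x, y, i) c).2.2 := by
          rcases hi with h | h | h | h <;> subst h <;> simp [execStepA, hL, IdxOK] <;>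
            split_ifs <;> simp_all
        rw [h1]
        have := ih (execStepA (x, y, i) c).2.2 x y hi' hx hy
        rw [h2]
        exact this
      · by_cases hM : c = 'M'
        · -- a move: pass1 records the heading; pass2Step matches A's coordinate update
          have h1 : pass1Step (i, ([] : List Int)) c = (i, [i]) := by
            simp [pass1Step, hR, hL, hM]
          have h2 : execStepA (x, y, i) c =
              ((pass2Step (x, y) i).1, (pass2Step (x, y) i).2, i) := by
            rcases hi with h | h | h | h <;> subst h <;>
              simp [execStepA, pass2Step, hM] <;>
              first
                | (constructor <;> omega)
                | omega
                | (split_ifs <;> simp_all <;> omega)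
          have hx' : (pass2Step (x, y) i).1 ≤ 9 := by
            rcases hi with h | h | h | h <;> subst h <;> simp [pass2Step] <;>
              first
                | omega
                | (split_ifs <;> omega)
          have hy' : (pass2Step (x, y) i).2 ≤ 9 := by
            rcases hi with h | h | h | h <;> subst h <;> simp [pass2Step] <;>
              first
                | omega
                | (split_ifs <;> omega)
          rw [h1, pass1_acc t i [i], h2]
          have := ih i (pass2Step (x, y) i).1 (pass2Step (x, y) i).2 hi hx' hy'
          refine ⟨this.1, ?_, this.2.2⟩
          rw [List.foldl_append]
          exact this.2.1
        · -- irrelevant character: both states unchanged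
          have h1 : pass1Step (i, ([] : List Int)) c = (i, []) := by
            simp [pass1Step, hR, hL, hM]
          have h2 : execStepA (x, y, i) c = (x, y, i) := by
            simp [execStepA, hR, hL, hM]
            constructor <;> omega
          rw [h1, h2]
          exact ih i x y hi hx hy

-- the two final heading→letter conversions agree on every valid heading
theorem letter_eq (i : Int) (hi : IdxOK i) :
    ((PySem.List.pyGet? ["N", "E", "S", "W"] i).getD "") =
      ((PySem.Str.pyGet? "NESW" i).getD ' ').toString := by
  rcases hi with h | h | h | h <;> subst h <;> decide

-- ===== VERDICT (by name: the statement is the Claim_ definition above) =====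
theorem execute_spec : Claim_equal_execute := by
  intro command _
  unfold Spec_execute execute execute_alt
  have h := sim command.toList 0 0 0 (Or.inl rfl) (by norm_num) (by norm_num)
  simp only at h
  obtain ⟨h1, h2, hidx, -, -⟩ := h
  dsimp only
  rw [← h1, h2, letter_eq _ (h1 ▸ hidx)]
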